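-- pv_equiv track=rewrite | github.com/ebehlmann/puzzling | python/advent_of_code/2015/day_11.py | check_for_doubles
-- ===== SOURCE A (Python) =====
-- def check_for_doubles(password):
-- 	doubles = 0
-- 	i = 0
-- 	while i < len(password) - 1:
-- 		if password[i] == password[i+1]:
-- 			doubles += 1
-- 			if doubles == 2:
-- 				return True
-- 			i += 2
-- 		else:
-- 			i += 1
-- 	return False
-- ===== SOURCE B (Python) =====
-- def check_for_doubles(password):
--     pairs = [i for i in range(len(password) - 1) if password[i] == password[i + 1]]
--     return bool(pairs) and pairs[-1] >= pairs[0] + 2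
-- ===== Notes on version B (the rewrite author's own statement) =====
-- stated objective: simpler
-- what changed: Replaced the greedy skip-2 while-loop with counter by one comprehension collecting every adjacent-equal-pair position and a single comparison pairs[-1] >= pairs[0] + 2 (two non-overlapping pairs exist iff the first and last pair positions are at least 2 apart).
import Mathlib
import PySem

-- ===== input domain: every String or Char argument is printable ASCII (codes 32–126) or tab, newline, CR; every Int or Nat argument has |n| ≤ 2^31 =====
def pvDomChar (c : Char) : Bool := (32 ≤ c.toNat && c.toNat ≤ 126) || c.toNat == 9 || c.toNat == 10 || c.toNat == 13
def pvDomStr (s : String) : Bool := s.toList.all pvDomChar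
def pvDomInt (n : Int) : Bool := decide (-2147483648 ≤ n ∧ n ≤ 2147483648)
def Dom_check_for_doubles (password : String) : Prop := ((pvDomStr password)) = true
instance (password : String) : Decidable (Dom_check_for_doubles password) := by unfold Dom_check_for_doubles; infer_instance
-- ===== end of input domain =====

-- B replaces A's greedy skip-2 while-loop by collecting all adjacent-equal-pair
-- positions in one comprehension and comparing the first with the last (simpler).

-- ===== PORT A =====
-- the while loop, as structural recursion on the character list; `i += 2` drops
-- both characters of the matched pair, `i += 1` drops one character
def pvGoA : List Char → Nat → Bool
  | a :: b :: rest, doubles =>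
      if a == b then
        (if doubles + 1 == 2 then true else pvGoA rest (doubles + 1))
      else pvGoA (b :: rest) doubles
  | _, _ => false

def check_for_doubles (password : String) : Bool := pvGoA password.toList 0

-- ===== PORT B =====
-- the list comprehension `[i for i in range(len(password)-1) if password[i] == password[i+1]]`
def pvPairs (s : List Char) : List Nat :=
  (List.range (s.length - 1)).filter (fun i => s.getD i ' ' == s.getD (i + 1) ' ')

def check_for_doubles_alt (password : String) : Bool :=
  match pvPairs password.toList with
  | [] => false                       -- bool(pairs) is False
  | h :: t => decide ((h :: t).getLastD 0 ≥ h + 2)   -- pairs[-1] >= pairs[0] + 2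

-- ===== PRECONDITION & SPEC =====
def Spec_check_for_doubles (password : String) (out : Bool) : Prop := out = check_for_doubles_alt password
instance (password : String) (out : Bool) : Decidable (Spec_check_for_doubles password out) := by unfold Spec_check_for_doubles; infer_instance

-- ===== CLAIM (what is proved, stated in full; the proofs are below) =====
def Claim_equal_check_for_doubles : Prop := ∀ (password : String), Dom_check_for_doubles password → Spec_check_for_doubles password (check_for_doubles password)

-- ===== LEMMAS AND PROOFS =====

-- B-side result, as a function of the character list
def pvAltB (s : List Char) : Bool :=
  match pvPairs s with
  | [] => false
  | h :: t => decide ((h :: t).getLastD 0 ≥ h + 2)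

-- has some adjacent equal pair: what pvGoA computes once one double was found
def pvHasAdj : List Char → Bool
  | a :: b :: rest => a == b || pvHasAdj (b :: rest)
  | _ => false

lemma pvGoA_one : ∀ (s : List Char), pvGoA s 1 = pvHasAdj s := by
  intro s
  induction s with
  | nil => rfl
  | cons a t ih =>
      cases t with
      | nil => rfl
      | cons b t' =>
          simp only [pvGoA, pvHasAdj]
          by_cases h : a = b
          · simp [h]
          · simp [h, ih]

lemma pvPairs_cons (a : Char) (s : List Char) :
    pvPairs (a :: s) =
      (if (match s with | b :: _ => a == b | [] => false) then [0] else [])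
        ++ (pvPairs s).map (· + 1) := by
  cases s with
  | nil => simp [pvPairs]
  | cons b t =>
      simp only [pvPairs, List.length_cons, Nat.add_sub_cancel, List.range_succ_eq_map,
        List.filter_cons, List.filter_map, List.getD,
        List.getElem?_cons_succ, List.getElem?_cons_zero]
      have hfc : List.filter ((fun i => (a :: b :: t)[i]?.getD ' ' == (b :: t)[i]?.getD ' ') ∘ Nat.succ)
            (List.range t.length)
          = List.filter (fun i => (b :: t)[i]?.getD ' ' == t[i]?.getD ' ') (List.range t.length) :=
        List.filter_congr (by intro i _; simp [Function.comp])
      have hmc : List.map Nat.succ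
            (List.filter (fun i => (b :: t)[i]?.getD ' ' == t[i]?.getD ' ') (List.range t.length))
          = List.map (fun x => x + 1)
            (List.filter (fun i => (b :: t)[i]?.getD ' ' == t[i]?.getD ' ') (List.range t.length)) := by
        simp
      rw [hfc, hmc]
      split_ifs with h <;> simp_all

lemma pvHasAdj_pairs : ∀ (s : List Char), pvHasAdj s = !(pvPairs s).isEmpty := by
  intro s
  induction s with
  | nil => rfl
  | cons a t ih =>
      cases t with
      | nil => rfl
      | cons b t' =>
          rw [pvPairs_cons]
          simp only [pvHasAdj]
          by_cases h : a = b
          · simp [h]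
          · simp [h, ih]

lemma pvLastD_map_succ : ∀ (l : List Nat) (d d' : Nat), l ≠ [] →
    (l.map (· + 1)).getLastD d = l.getLastD d' + 1 := by
  intro l
  induction l with
  | nil => intro _ _ h; exact absurd rfl h
  | cons x t ih =>
      intro d d' _
      cases t with
      | nil => rfl
      | cons y u =>
          simp only [List.map_cons, List.getLastD_cons]
          simp

lemma pvLastD_append (l₁ l₂ : List Nat) (d : Nat) (h : l₂ ≠ []) :
    (l₁ ++ l₂).getLastD d = l₂.getLastD d := by
  induction l₁ with
  | nil => rfl
  | cons x t ih =>
      cases t with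
      | nil => cases l₂ with
        | nil => exact absurd rfl h
        | cons y u => simp
      | cons y u => simpa [List.getLastD_cons] using ih

lemma pvMain : ∀ (n : Nat) (s : List Char), s.length ≤ n → pvGoA s 0 = pvAltB s := by
  intro n
  induction n with
  | zero =>
      intro s hs
      have : s = [] := List.eq_nil_of_length_eq_zero (Nat.le_zero.mp hs)
      subst this; rfl
  | succ n ih =>
      intro s hs
      cases s with
      | nil => rfl
      | cons a t =>
          cases t with
          | nil => rfl
          | cons b r =>
              have hlen : (b :: r).length ≤ n := by
                simp only [List.length_cons] at hs ⊢; omega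
              by_cases hab : a = b
              · subst hab
                have hA : pvGoA (a :: a :: r) 0 = pvHasAdj r := by
                  simp [pvGoA, pvGoA_one]
                rw [hA]
                unfold pvAltB
                rw [pvPairs_cons]
                simp only [beq_self_eq_true, if_true, List.cons_append, List.nil_append]
                rcases hP : pvPairs r with _ | ⟨h1, tl⟩
                · have hadj : pvHasAdj r = false := by rw [pvHasAdj_pairs, hP]; rfl
                  rw [hadj, pvPairs_cons, hP]
                  split_ifs with h0 <;> simp
                · have hadj : pvHasAdj r = true := by rw [pvHasAdj_pairs, hP]; rfl
                  rw [hadj, pvPairs_cons, hP]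
                  -- the pair list is 0 :: map (·+1) (pfx ++ map (·+1) (h1 :: tl)); its last is ≥ 2
                  have key : ∀ pfx : List Nat,
                      (List.map (· + 1) (pfx ++ List.map (· + 1) (h1 :: tl))).getLastD 0 ≥ 2 := by
                    intro pfx
                    have hne : pfx ++ List.map (· + 1) (h1 :: tl) ≠ [] := by simp
                    rw [pvLastD_map_succ _ 0 0 hne,
                        pvLastD_append _ _ _ (by simp),
                        pvLastD_map_succ _ 0 0 (by simp)]
                    omega
                  split_ifs with h0
                  · have := key [0]
                    simp only [List.getLastD_cons] at this ⊢
                    simpa using this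
                  · have := key []
                    simp only [List.getLastD_cons] at this ⊢
                    simpa using this
              · have hA : pvGoA (a :: b :: r) 0 = pvGoA (b :: r) 0 := by
                  simp [pvGoA, hab]
                rw [hA, ih _ hlen]
                unfold pvAltB
                rw [pvPairs_cons a (b :: r)]
                simp only [show (a == b) = false from by simp [hab], Bool.false_eq_true, if_false, List.nil_append]
                rcases hP : pvPairs (b :: r) with _ | ⟨h1, tl⟩
                · rfl
                · have hm := pvLastD_map_succ (h1 :: tl) 0 0 (by simp)
                  simp only [List.map_cons] at hm ⊢
                  rw [hm]
                  simp only [decide_eq_decide]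
                  omega

-- ===== VERDICT (by name: the statement is the Claim_ definition above) =====
theorem check_for_doubles_spec : Claim_equal_check_for_doubles := by
  intro password _
  unfold Spec_check_for_doubles check_for_doubles check_for_doubles_alt
  have h := pvMain password.toList.length password.toList (le_refl _)
  rw [h]; rfl
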